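-- pv_equiv track=rewrite | github.com/mihirshah2005/Paper2Code | outputs/transformer/experiments/multi_signal_json/transformer_repo/dataset_loader.py | linearize_tree
-- ===== SOURCE A (Python) =====
-- def linearize_tree(tree_str: str) -> str:
--     """
--     Linearize a bracketed tree structure using a simple tokenization algorithm.
--     This function tokenizes parentheses and labels, then returns a space-separated string.
--     """
--     tokens = []
--     token = ''
--     for char in tree_str:
--         if char in ('(', ')'):
--             if token:
--                 tokens.append(token)
--                 token = ''
--             tokens.append(char)
--         elif char.isspace():
--             if token:
--                 tokens.append(token)
--                 token = ''
--         else: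
--             token += char
--     if token:
--         tokens.append(token)
--     return " ".join(tokens)
-- ===== SOURCE B (Python) =====
-- def linearize_tree(tree_str: str) -> str:
--     return " ".join(tree_str.replace("(", " ( ").replace(")", " ) ").split())
-- ===== Notes on version B (the rewrite author's own statement) =====
-- stated objective: idiomatic
-- what changed: Replaces the char-by-char state machine with a pad-then-split pipeline: surround each parenthesis with spaces, split on whitespace, and join with single spaces.
import Mathlib
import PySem

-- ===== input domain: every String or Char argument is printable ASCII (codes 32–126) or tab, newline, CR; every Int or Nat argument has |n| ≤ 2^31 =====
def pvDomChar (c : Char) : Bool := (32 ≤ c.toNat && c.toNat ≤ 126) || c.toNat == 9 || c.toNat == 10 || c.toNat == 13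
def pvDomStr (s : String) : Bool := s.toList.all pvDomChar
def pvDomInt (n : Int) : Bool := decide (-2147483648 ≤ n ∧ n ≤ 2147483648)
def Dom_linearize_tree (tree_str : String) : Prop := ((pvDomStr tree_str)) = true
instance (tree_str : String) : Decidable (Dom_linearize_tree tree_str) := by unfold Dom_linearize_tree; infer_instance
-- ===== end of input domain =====

-- B replaces A's char-by-char state machine by the idiomatic pad-then-split pipeline
-- (surround each parenthesis with spaces, split on whitespace, rejoin); same cost, no speed claim.

-- ===== PORT A =====
-- one loop step of A: classify the char, flush/extend the pending token
def ltStep (st : List (List Char) × List Char) (ch : Char) : List (List Char) × List Char :=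
  if ch = '(' ∨ ch = ')' then
    ((if st.2.isEmpty then st.1 else st.1 ++ [st.2]) ++ [[ch]], [])
  else if PySem.Chars.isspace ch then
    (if st.2.isEmpty then st.1 else st.1 ++ [st.2], [])
  else
    (st.1, st.2 ++ [ch])

def linearize_tree (tree_str : String) : String :=
  let st := tree_str.toList.foldl ltStep ([], [])
  let tokens := if st.2.isEmpty then st.1 else st.1 ++ [st.2]
  String.ofList (PySem.Chars.join " ".toList tokens)

-- ===== PORT B =====
def linearize_tree_alt (tree_str : String) : String :=
  PySem.Str.join " "
    (PySem.Str.split₀ (PySem.Str.replace (PySem.Str.replace tree_str "(" " ( ") ")" " ) "))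

-- ===== PRECONDITION & SPEC =====
def Spec_linearize_tree (tree_str : String) (out : String) : Prop := out = linearize_tree_alt tree_str
instance (tree_str : String) (out : String) : Decidable (Spec_linearize_tree tree_str out) := by unfold Spec_linearize_tree; infer_instance

-- ===== CLAIM (what is proved, stated in full; the proofs are below) =====
def Claim_equal_linearize_tree : Prop := ∀ (tree_str : String), Dom_linearize_tree tree_str → Spec_linearize_tree tree_str (linearize_tree tree_str)

-- ===== LEMMAS AND PROOFS =====

-- what B's two replaces do to a single character
def lvPad (c : Char) : List Char := if c = '(' ∨ c = ')' then [' ', c, ' '] else [c]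

-- A's postprocessing of the final fold state
def lvFinish (st : List (List Char) × List Char) : List (List Char) :=
  if st.2.isEmpty then st.1 else st.1 ++ [st.2]

lemma replace_go_single (d : Char) (new : List Char) :
    ∀ (l : List Char) (fuel : Nat) (acc : List Char), l.length ≤ fuel →
    PySem.Chars.replace.go [d] new fuel l acc
      = acc.reverse ++ l.flatMap (fun c => if c = d then new else [c]) := by
  intro l
  induction l with
  | nil =>
    intro fuel acc _
    cases fuel <;> simp [PySem.Chars.replace.go]
  | cons c t ih =>
    intro fuel acc h
    cases fuel with
    | zero => simp at h
    | succ f =>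
      rw [PySem.Chars.replace.go]
      by_cases hdc : d = c
      · subst hdc
        simp only [List.isPrefixOf, BEq.rfl, Bool.true_and, if_pos]
        have hd : List.drop [d].length (d :: t) = t := rfl
        rw [hd, ih f (new.reverse ++ acc) (by simpa using h)]
        simp
      · have hpre : List.isPrefixOf [d] (c :: t) = false := by
          simp [List.isPrefixOf, hdc]
        rw [hpre]
        simp only [Bool.false_eq_true, if_false]
        rw [ih f (c :: acc) (by simpa using h)]
        simp [Ne.symm hdc]

lemma replace_single (cs : List Char) (d : Char) (new : List Char) :
    PySem.Chars.replace cs [d] new = cs.flatMap (fun c => if c = d then new else [c]) := by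
  rw [PySem.Chars.replace]
  simp only [List.isEmpty_cons, Bool.false_eq_true, if_false]
  rw [replace_go_single d new cs cs.length [] (le_refl _)]
  simp

lemma double_replace (cs : List Char) :
    PySem.Chars.replace (PySem.Chars.replace cs ['('] [' ', '(', ' ']) [')'] [' ', ')', ' ']
      = cs.flatMap lvPad := by
  rw [replace_single, replace_single, List.flatMap_assoc]
  refine congrArg (fun F => List.flatMap F cs) (funext fun c => ?_)
  by_cases h1 : c = '('
  · subst h1; simp [lvPad]
  · by_cases h2 : c = ')'
    · subst h2; simp [lvPad]
    · simp [lvPad, h1, h2]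

lemma isspace_space : PySem.Chars.isspace ' ' = true := by decide

lemma split_go_pad (cs : List Char) :
    ∀ (cur : List Char) (acc : List (List Char)),
    PySem.Chars.split₀.go (cs.flatMap lvPad) cur acc
      = lvFinish (cs.foldl ltStep (acc.reverse, cur.reverse)) := by
  induction cs with
  | nil =>
    intro cur acc
    rw [List.flatMap_nil, PySem.Chars.split₀.go, lvFinish]
    by_cases hc : cur.isEmpty <;> simp [hc]
  | cons c t ih =>
    intro cur acc
    by_cases hp : c = '(' ∨ c = ')'
    · have hsp : PySem.Chars.isspace c = false := by
        rcases hp with h | h <;> subst h <;> decide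
      have hpad : lvPad c = [' ', c, ' '] := by simp [lvPad, hp]
      rw [List.flatMap_cons, hpad]
      show PySem.Chars.split₀.go (' ' :: c :: ' ' :: t.flatMap lvPad) cur acc = _
      rw [PySem.Chars.split₀.go]
      simp only [isspace_space, if_pos]
      by_cases hc : cur.isEmpty
      all_goals
        simp only [hc, Bool.false_eq_true, if_true, if_false]
        rw [PySem.Chars.split₀.go]
        simp only [hsp, Bool.false_eq_true, if_false]
        rw [PySem.Chars.split₀.go]
        simp only [isspace_space, if_pos, List.isEmpty_cons, Bool.false_eq_true, if_false,
          List.reverse_cons, List.reverse_nil, List.nil_append]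
        rw [ih]
        simp [List.foldl_cons, ltStep, hp, hc, List.isEmpty_reverse]
    · by_cases hs : PySem.Chars.isspace c = true
      · have hpad : lvPad c = [c] := by simp [lvPad, hp]
        rw [List.flatMap_cons, hpad]
        show PySem.Chars.split₀.go (c :: t.flatMap lvPad) cur acc = _
        rw [PySem.Chars.split₀.go]
        simp only [hs, if_pos]
        by_cases hc : cur.isEmpty
        all_goals
          simp only [hc, Bool.false_eq_true, if_true, if_false]
          rw [ih]
          simp [List.foldl_cons, ltStep, hp, hs, hc, List.isEmpty_reverse]
      · have hpad : lvPad c = [c] := by simp [lvPad, hp]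
        rw [List.flatMap_cons, hpad]
        show PySem.Chars.split₀.go (c :: t.flatMap lvPad) cur acc = _
        rw [PySem.Chars.split₀.go]
        simp only [hs, Bool.false_eq_true, if_false]
        rw [ih]
        simp [List.foldl_cons, ltStep, hp, hs]

-- ===== VERDICT (by name: the statement is the Claim_ definition above) =====
theorem linearize_tree_spec : Claim_equal_linearize_tree := by
  intro s _
  unfold Spec_linearize_tree
  rw [← String.toList_inj]
  rw [linearize_tree, linearize_tree_alt]
  simp only [PySem.Str.toList_join]
  rw [PySem.Str.split₀_map_toList, PySem.Str.toList_replace, PySem.Str.toList_replace]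
  have h1 : ("(" : String).toList = ['('] := by decide
  have h2 : (" ( " : String).toList = [' ', '(', ' '] := by decide
  have h3 : (")" : String).toList = [')'] := by decide
  have h4 : (" ) " : String).toList = [' ', ')', ' '] := by decide
  rw [h1, h2, h3, h4, double_replace, PySem.Chars.split₀, split_go_pad]
  simp [lvFinish]
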